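-- pv_equiv track=rewrite | github.com/abidswapnil/patterns | symmetricButterfly.py | makePattern
-- ===== SOURCE A (Python) =====
-- def makePattern(n: int):
--   s, res, prev, rng = '', '', 2 * (n - 1), 0
--
--   for i in range(n):
--     rng = 2 * (i + 1)
--
--     for j in range(rng):
--       s += '*'
--       if j == rng // 2 - 1: s += ' ' * prev
--
--     if rng: res += s + '\n'
--     prev -= 2
--     s = ''
--
--   return res + res[:-2 * n - 2][::-1]
-- ===== SOURCE B (Python) =====
-- def makePattern(n: int):
--   lines = ['*' * (i + 1) + ' ' * (2 * (n - 1 - i)) + '*' * (i + 1) for i in range(n)]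
--   top = ''.join(line + '\n' for line in lines)
--   bottom = '\n'.join(lines[:-1][::-1])
--   return top + bottom
-- ===== Notes on version B (the rewrite author's own statement) =====
-- stated objective: simpler
-- what changed: Replaces the character-by-character nested loops and the char-reversed slice of the whole output string by closed-form per-line construction ('*'*(i+1)+' '*(2*(n-1-i))+'*'*(i+1)), joining the top lines and mirroring the butterfly by reversing the LIST of lines (minus the last) instead of reversing a truncated character slice.
import Mathlib
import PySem

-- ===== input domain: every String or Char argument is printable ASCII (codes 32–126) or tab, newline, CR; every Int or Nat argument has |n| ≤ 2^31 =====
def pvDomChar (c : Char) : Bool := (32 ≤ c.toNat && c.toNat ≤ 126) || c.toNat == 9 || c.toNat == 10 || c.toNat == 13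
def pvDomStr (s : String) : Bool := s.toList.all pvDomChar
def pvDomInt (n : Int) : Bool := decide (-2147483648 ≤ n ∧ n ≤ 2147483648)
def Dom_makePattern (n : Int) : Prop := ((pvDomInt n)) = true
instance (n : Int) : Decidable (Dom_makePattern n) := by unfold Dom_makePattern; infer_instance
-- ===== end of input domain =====

-- B builds each butterfly line in closed form and mirrors by reversing the list of top lines;
-- A builds the top character by character and mirrors by char-reversing a truncated slice (objective: simpler).

-- ===== PORT A =====
-- body of A's inner 'for j in range(rng)' loop: s += '*'; if j == rng // 2 - 1: s += ' ' * prev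
def pvInnerA (prev rng : Int) (s : List Char) (j : Int) : List Char :=
  let s := s ++ ['*']
  if j = PySem.Int.floordiv rng 2 - 1 then s ++ PySem.List.pyRepeat [' '] prev else s

-- body of A's outer 'for i in range(n)' loop over the state (s, res, prev)
def pvStepA (st : List Char × List Char × Int) (i : Int) : List Char × List Char × Int :=
  let rng : Int := 2 * (i + 1)
  let s := (PySem.List.pyRange 0 rng).foldl (pvInnerA st.2.2 rng) st.1
  let res := if rng ≠ 0 then st.2.1 ++ s ++ ['\n'] else st.2.1
  ([], res, st.2.2 - 2)

-- literal transliteration of A: the two nested loops, then res + res[:-2*n-2][::-1]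
def makePattern (n : Int) : String :=
  let st := (PySem.List.pyRange 0 n).foldl pvStepA ([], [], 2 * (n - 1))
  String.ofList (st.2.1 ++
    ((PySem.List.slice? (PySem.List.slice st.2.1 none (some (-2 * n - 2))) none none (-1)).getD []))

-- ===== PORT B =====
-- literal transliteration of B: closed-form lines, top = join of line+'\n', bottom = '\n'.join(lines[:-1][::-1])
def makePattern_alt (n : Int) : String :=
  let lines : List (List Char) := (PySem.List.pyRange 0 n).map (fun i =>
    PySem.List.pyRepeat ['*'] (i + 1) ++ PySem.List.pyRepeat [' '] (2 * (n - 1 - i)) ++ PySem.List.pyRepeat ['*'] (i + 1))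
  let top : List Char := PySem.Chars.join [] (lines.map (fun line => line ++ ['\n']))
  let bottom : List Char := PySem.Chars.join ['\n'] ((PySem.List.slice? (PySem.List.slice lines none (some (-1))) none none (-1)).getD [])
  String.ofList (top ++ bottom)

-- ===== PRECONDITION & SPEC =====
def Spec_makePattern (n : Int) (out : String) : Prop := out = makePattern_alt n
instance (n : Int) (out : String) : Decidable (Spec_makePattern n out) := by unfold Spec_makePattern; infer_instance

-- ===== CLAIM (what is proved, stated in full; the proofs are below) =====
def Claim_equal_makePattern : Prop := ∀ (n : Int), Dom_makePattern n → Spec_makePattern n (makePattern n)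

-- ===== LEMMAS AND PROOFS =====

-- line i of the pattern, as characters
def pvLine (n i : Int) : List Char :=
  List.replicate (i + 1).toNat '*' ++ List.replicate (2 * (n - 1 - i)).toNat ' ' ++ List.replicate (i + 1).toNat '*'

-- flatten with '\n' appended to every block
def pvTop (L : List (List Char)) : List Char := (L.map (fun l => l ++ ['\n'])).flatten

theorem pvLine_reverse (n i : Int) : (pvLine n i).reverse = pvLine n i := by
  simp [pvLine, List.append_assoc]

theorem pv_join_nil (L : List (List Char)) : PySem.Chars.join [] L = L.flatten := by
  induction L with
  | nil => simp [PySem.Chars.join_nil]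
  | cons a t ih =>
      cases t with
      | nil => simp [PySem.Chars.join_singleton]
      | cons b r => rw [PySem.Chars.join_cons_cons]; simp [ih]

theorem pv_join_concat (sep : List Char) (xs : List (List Char)) (y : List Char) (h : xs ≠ []) :
    PySem.Chars.join sep (xs ++ [y]) = PySem.Chars.join sep xs ++ sep ++ y := by
  induction xs with
  | nil => simp at h
  | cons a t ih =>
      cases t with
      | nil => simp [PySem.Chars.join_cons_cons, PySem.Chars.join_singleton]
      | cons b r =>
          have ih' := ih (by simp)
          simp only [List.cons_append] at ih' ⊢
          rw [PySem.Chars.join_cons_cons, PySem.Chars.join_cons_cons, ih']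
          simp [List.append_assoc]

theorem pv_join_reverse (L : List (List Char)) :
    (PySem.Chars.join ['\n'] L).reverse = PySem.Chars.join ['\n'] ((L.map List.reverse).reverse) := by
  induction L with
  | nil => simp [PySem.Chars.join_nil]
  | cons a t ih =>
      cases t with
      | nil => simp [PySem.Chars.join_singleton]
      | cons b r =>
          rw [PySem.Chars.join_cons_cons]
          have hne : (List.map List.reverse (b :: r)).reverse ≠ [] := by simp
          rw [List.map_cons, List.reverse_cons, pv_join_concat _ _ _ hne]
          simp [ih]

theorem pv_join_dropLast (L : List (List Char)) :
    PySem.Chars.join ['\n'] L = (pvTop L).dropLast := by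
  induction L with
  | nil => simp [PySem.Chars.join_nil, pvTop]
  | cons a t ih =>
      cases t with
      | nil => simp [PySem.Chars.join_singleton, pvTop]
      | cons b r =>
          rw [PySem.Chars.join_cons_cons, ih]
          show _ = (((a ++ ['\n']) :: List.map _ (b :: r)).flatten).dropLast
          rw [List.flatten_cons, List.dropLast_append_of_ne_nil (by simp [List.flatten_cons])]
          simp [pvTop, List.append_assoc]

theorem pvTop_length (L : List (List Char)) (w : Nat) (h : ∀ l ∈ L, l.length = w) :
    (pvTop L).length = L.length * (w + 1) := by
  induction L with
  | nil => simp [pvTop]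
  | cons a t ih =>
      have := h a (by simp)
      rw [pvTop, List.map_cons, List.flatten_cons, List.length_append]
      rw [show ((t.map fun l => l ++ ['\n']).flatten) = pvTop t from rfl,
        ih (fun l hl => h l (by simp [hl]))]
      simp [this]; ring

theorem pv_take_top (L : List (List Char)) (w : Nat) (h : ∀ l ∈ L, l.length = w) :
    (pvTop L).take ((pvTop L).length - (w + 2)) = PySem.Chars.join ['\n'] L.dropLast := by
  rcases List.eq_nil_or_concat L with rfl | ⟨Ld, last, rfl⟩
  · simp [pvTop, PySem.Chars.join_nil]
  · simp only [List.concat_eq_append] at h ⊢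
    have hlen : (pvTop Ld).length = Ld.length * (w + 1) :=
      pvTop_length Ld w (fun l hl => h l (by simp [hl]))
    have hsplit : pvTop (Ld ++ [last]) = pvTop Ld ++ (last ++ ['\n']) := by
      simp [pvTop]
    have hlast : last.length = w := h last (by simp)
    have hl2 : (pvTop (Ld ++ [last])).length = (pvTop Ld).length + (w + 1) := by
      rw [hsplit]; simp [hlast]
    have harith : (pvTop (Ld ++ [last])).length - (w + 2) = (pvTop Ld).length - 1 := by omega
    rw [harith, hsplit, List.take_append_of_le_length (by omega), ← List.dropLast_eq_take,
      ← pv_join_dropLast, List.dropLast_concat]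

-- the inner for-j loop of A, away from the hit index, appends plain stars
theorem pv_fold_stars (prev rng : Int) :
    ∀ (k : Nat) (a b : Int) (s : List Char), b - a = (k : Int) →
      (∀ j, a ≤ j → j < b → j ≠ PySem.Int.floordiv rng 2 - 1) →
      (PySem.List.pyRange a b).foldl (pvInnerA prev rng) s = s ++ List.replicate k '*' := by
  intro k
  induction k with
  | zero => intro a b s hk _; rw [PySem.List.pyRange_one_eq_nil (by omega)]; simp
  | succ m ih =>
      intro a b s hk hne
      rw [PySem.List.pyRange_one_cons (by omega), List.foldl_cons]
      have ha : a ≠ PySem.Int.floordiv rng 2 - 1 := hne a le_rfl (by omega)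
      rw [show pvInnerA prev rng s a = s ++ ['*'] by
        simp only [pvInnerA]; rw [if_neg ha]]
      rw [ih (a + 1) b _ (by omega) (fun j h1 h2 => hne j (by omega) h2)]
      simp [List.replicate_succ, List.append_assoc]

-- the full inner loop produces one butterfly line (stars, spaces, stars)
theorem pv_inner (i prev : Int) (hi : 0 ≤ i) (s : List Char) :
    (PySem.List.pyRange 0 (2 * (i + 1))).foldl (pvInnerA prev (2 * (i + 1))) s
   = s ++ List.replicate (i + 1).toNat '*' ++ List.replicate prev.toNat ' ' ++ List.replicate (i + 1).toNat '*' := by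
  have hfd : PySem.Int.floordiv (2 * (i + 1)) 2 = i + 1 := by simp [PySem.Int.floordiv]
  rw [PySem.List.pyRange_one_append 0 (i + 1) (2 * (i + 1)) (by omega) (by omega), List.foldl_append]
  rw [PySem.List.pyRange_one_succ_right (a := 0) (b := i) (by omega), List.foldl_append]
  rw [pv_fold_stars prev _ i.toNat 0 i _ (by omega) (fun j h1 h2 => by omega)]
  simp only [List.foldl_cons, List.foldl_nil]
  rw [show pvInnerA prev (2 * (i + 1)) (s ++ List.replicate i.toNat '*') i
      = s ++ List.replicate i.toNat '*' ++ ['*'] ++ PySem.List.pyRepeat [' '] prev by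
    simp only [pvInnerA]
    rw [if_pos (by rw [hfd]; ring)]]
  rw [pv_fold_stars prev _ (i + 1).toNat (i + 1) (2 * (i + 1)) _ (by omega) (fun j h1 h2 => by omega)]
  rw [PySem.List.pyRepeat_singleton]
  have : List.replicate i.toNat '*' ++ ['*'] = List.replicate (i + 1).toNat '*' := by
    rw [show (i + 1).toNat = i.toNat + 1 by omega, List.replicate_succ']
  simp only [List.append_assoc] at *
  rw [← this]
  simp [List.append_assoc]

-- the outer for-i loop accumulates the top lines
theorem pv_outer (n : Int) :
    ∀ (k : Nat) (a : Int) (res : List Char), 0 ≤ a → n - a = (k : Int) →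
      (PySem.List.pyRange a n).foldl pvStepA ([], res, 2 * (n - 1) - 2 * a)
      = ([], res ++ pvTop ((PySem.List.pyRange a n).map (pvLine n)), 2 * (n - 1) - 2 * n) := by
  intro k
  induction k with
  | zero =>
      intro a res ha hk
      rw [PySem.List.pyRange_one_eq_nil (by omega)]
      simp [pvTop]
      omega
  | succ m ih =>
      intro a res ha hk
      rw [PySem.List.pyRange_one_cons (by omega), List.foldl_cons]
      rw [show pvStepA ([], res, 2 * (n - 1) - 2 * a) a
          = ([], res ++ ([] ++ List.replicate (a + 1).toNat '*' ++ List.replicate (2 * (n - 1) - 2 * a).toNat ' ' ++ List.replicate (a + 1).toNat '*') ++ ['\n'], 2 * (n - 1) - 2 * a - 2) by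
        simp only [pvStepA]
        rw [pv_inner a (2 * (n - 1) - 2 * a) ha]
        rw [if_pos (by omega)]]
      have hrec := ih (a + 1) (res ++ ([] ++ List.replicate (a + 1).toNat '*' ++ List.replicate (2 * (n - 1) - 2 * a).toNat ' ' ++ List.replicate (a + 1).toNat '*') ++ ['\n']) (by omega) (by omega)
      rw [show 2 * (n - 1) - 2 * a - 2 = 2 * (n - 1) - 2 * (a + 1) by ring] at *
      rw [hrec]
      have hline : ([] : List Char) ++ List.replicate (a + 1).toNat '*' ++ List.replicate (2 * (n - 1) - 2 * a).toNat ' ' ++ List.replicate (a + 1).toNat '*' = pvLine n a := by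
        rw [pvLine, show (2 * (n - 1 - a)).toNat = (2 * (n - 1) - 2 * a).toNat by omega]
        simp [List.append_assoc]
      rw [List.map_cons, hline]
      simp [pvTop, List.append_assoc]

-- ===== VERDICT (by name: the statement is the Claim_ definition above) =====
theorem makePattern_spec : Claim_equal_makePattern := by
  intro n _
  unfold Spec_makePattern
  simp only [makePattern, makePattern_alt]
  have hlines : (fun i => PySem.List.pyRepeat ['*'] (i + 1) ++ PySem.List.pyRepeat [' '] (2 * (n - 1 - i)) ++ PySem.List.pyRepeat ['*'] (i + 1))
      = pvLine n := by
    funext i; simp [PySem.List.pyRepeat_singleton, pvLine]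
  rw [hlines]
  by_cases hn : n ≤ 0
  · rw [PySem.List.pyRange_one_eq_nil hn]
    simp [PySem.List.slice, PySem.List.slice?_none_none_neg_one, PySem.Chars.join_nil]
  · -- n ≥ 1
    rw [show (2 * (n - 1) : Int) = 2 * (n - 1) - 2 * 0 by ring,
      pv_outer n n.toNat 0 [] le_rfl (by omega)]
    simp only [List.nil_append]
    set L := (PySem.List.pyRange 0 n).map (pvLine n) with hL
    have hw : ∀ l ∈ L, l.length = (2 * n).toNat := by
      intro l hl
      obtain ⟨i, hi, rfl⟩ := List.mem_map.mp hl
      have := PySem.List.mem_pyRange_one.mp hi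
      simp [pvLine]
      omega
    -- A's slice res[:-2*n-2] is the top minus its last line and trailing newline
    rw [show (-2 * n - 2 : Int) = -(((2 * n + 2).toNat : Nat) : Int) by omega]
    rw [PySem.List.slice_to_neg_natCast _ _ (by omega)]
    rw [show (2 * n + 2).toNat = (2 * n).toNat + 2 by omega]
    rw [pv_take_top L (2 * n).toNat hw]
    rw [PySem.List.slice?_none_none_neg_one, Option.getD_some, pv_join_reverse]
    -- B's slice lines[:-1][::-1]
    rw [PySem.List.slice_to_neg_one, PySem.List.slice?_none_none_neg_one, Option.getD_some]
    rw [pv_join_nil]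
    have hpal : L.dropLast.map List.reverse = L.dropLast := by
      apply List.map_congr_left ?_ |>.trans L.dropLast.map_id
      intro l hl
      obtain ⟨i, hi, rfl⟩ := List.mem_map.mp (List.mem_of_mem_dropLast hl)
      exact pvLine_reverse n i
    rw [hpal]
    rfl
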